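-- pv_equiv track=rewrite | github.com/Klettgau/CSC-332 | ciphers/Hill.py | pad_message
-- ===== SOURCE A (Python) =====
-- def pad_message( msg, key_row):
--     msg_size = len(msg)
--     while msg_size % key_row != 0:
--         for i, ele in enumerate(msg):
--             msg.append(ele)
--             if len(msg) % key_row == 0:
--                 break
--         if len(msg) % key_row == 0:
--             break
--     return msg
-- ===== SOURCE B (Python) =====
-- def pad_message(msg, key_row):
--     n = len(msg)
--     count = (-n) % abs(key_row)
--     if count:
--         msg.extend(msg[i % n] for i in range(count))
--     return msg
-- ===== Notes on version B (the rewrite author's own statement) =====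
-- stated objective: simpler
-- what changed: B replaces A's nested while/for with double break by computing the pad count (-len) % abs(key_row) once and extending the list with one cyclic comprehension.
import Mathlib
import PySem

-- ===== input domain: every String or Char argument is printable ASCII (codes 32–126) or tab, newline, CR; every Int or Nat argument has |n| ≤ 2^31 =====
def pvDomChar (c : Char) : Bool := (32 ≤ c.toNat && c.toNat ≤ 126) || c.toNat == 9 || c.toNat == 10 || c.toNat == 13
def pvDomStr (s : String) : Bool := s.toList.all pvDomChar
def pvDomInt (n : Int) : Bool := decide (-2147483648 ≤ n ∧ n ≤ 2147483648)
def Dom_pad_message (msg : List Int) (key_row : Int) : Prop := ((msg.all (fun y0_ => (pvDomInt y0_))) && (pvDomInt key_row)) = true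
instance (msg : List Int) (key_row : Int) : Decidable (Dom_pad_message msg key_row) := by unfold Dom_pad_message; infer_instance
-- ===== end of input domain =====

-- B pads with a directly computed count and one cyclic extend instead of A's nested
-- while/for with double break; return value AND in-place mutation behaviour agree.

-- ===== PORT A =====
-- A's while/for appends msg's elements cyclically one at a time, re-checking
-- 'len(msg) % key_row == 0' after every append; at most key_row.natAbs appends
-- ever happen before the check fires, so that is the fuel for the loop.
-- 'cur.getD j 0' is Python's in-range 'ele = msg[j]' from enumerate (always in range here).
def padAgo (key_row : Int) (cur : List Int) (j : Nat) (fuel : Nat) : List Int :=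
  match fuel with
  | 0 => cur
  | Nat.succ f =>
    if PySem.Int.mod (cur.length : Int) key_row = 0 then cur
    else padAgo key_row (cur ++ [cur.getD j 0]) (j + 1) f

def pad_message (msg : List Int) (key_row : Int) : List Int :=
  padAgo key_row msg 0 key_row.natAbs

-- ===== PORT B =====
def pad_message_alt (msg : List Int) (key_row : Int) : List Int :=
  let n : Int := (msg.length : Int)
  let count : Int := PySem.Int.mod (-n) (key_row.natAbs : Int)
  if count ≠ 0 then
    msg ++ (PySem.List.pyRange 0 count 1).map
      (fun i => PySem.List.pyGetD msg (PySem.Int.mod i n) 0)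
  else msg

-- ===== PRECONDITION & SPEC =====
-- key_row = 0 makes 'len % key_row' raise ZeroDivisionError in A (and in B).
def Pre_pad_message (msg : List Int) (key_row : Int) : Prop := key_row ≠ 0
instance (msg : List Int) (key_row : Int) : Decidable (Pre_pad_message msg key_row) := by unfold Pre_pad_message; infer_instance
def pvWitness_pad_message : List Int × Int := ([1, 2, 3], 2)

def Spec_pad_message (msg : List Int) (key_row : Int) (out : List Int) : Prop := out = pad_message_alt msg key_row
instance (msg : List Int) (key_row : Int) (out : List Int) : Decidable (Spec_pad_message msg key_row out) := by unfold Spec_pad_message; infer_instance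

-- ===== CLAIM (what is proved, stated in full; the proofs are below) =====
def Claim_equal_pad_message : Prop := ∀ (msg : List Int) (key_row : Int), Dom_pad_message msg key_row → Pre_pad_message msg key_row → Spec_pad_message msg key_row (pad_message msg key_row)

-- ===== LEMMAS AND PROOFS =====

-- the cyclic pad of length j drawn from msg
def pads (msg : List Int) (n j : Nat) : List Int :=
  (List.range j).map (fun i => msg.getD (i % n) 0)

theorem pads_succ (msg : List Int) (n j : Nat) :
    pads msg n (j + 1) = pads msg n j ++ [msg.getD (j % n) 0] := by
  simp [pads, List.range_succ]

theorem pads_length (msg : List Int) (n j : Nat) : (pads msg n j).length = j := by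
  simp [pads]

-- 'len % key_row == 0' is divisibility by |key_row|
theorem mod_zero_iff (m : Nat) (k : Int) :
    PySem.Int.mod (m : Int) k = 0 ↔ m % k.natAbs = 0 := by
  rw [PySem.Int.mod_eq_zero_iff_dvd]
  constructor
  · intro h
    exact Nat.mod_eq_zero_of_dvd (Int.ofNat_dvd.mp ((Int.natAbs_dvd).mpr h))
  · intro h
    exact (Int.natAbs_dvd).mp (Int.ofNat_dvd.mpr (Nat.dvd_of_mod_eq_zero h))

theorem pads_getD (msg : List Int) (n j i : Nat) (hi : i < j) :
    (pads msg n j).getD i 0 = msg.getD (i % n) 0 := by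
  unfold pads
  rw [List.getD_eq_getElem?_getD, List.getElem?_map, List.getElem?_range hi]
  rfl

theorem getD_append_pads (msg : List Int) (j : Nat) (hn : 0 < msg.length) :
    (msg ++ pads msg msg.length j).getD j 0 = msg.getD (j % msg.length) 0 := by
  by_cases hj : j < msg.length
  · rw [List.getD_eq_getElem?_getD, List.getElem?_append_left hj,
      ← List.getD_eq_getElem?_getD, Nat.mod_eq_of_lt hj]
  · push_neg at hj
    rw [List.getD_eq_getElem?_getD, List.getElem?_append_right hj,
      ← List.getD_eq_getElem?_getD]
    rw [pads_getD msg msg.length j (j - msg.length) (by omega)]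
    rw [Nat.mod_eq_sub_mod hj]

theorem loop_eq (msg : List Int) (key_row : Int)
    (c : Nat) (hn : c ≠ 0 → 0 < msg.length)
    (hc : (msg.length + c) % key_row.natAbs = 0)
    (hcm : ∀ j, j < c → (msg.length + j) % key_row.natAbs ≠ 0) :
    ∀ fuel j, j ≤ c → c - j ≤ fuel →
      padAgo key_row (msg ++ pads msg msg.length j) j fuel
        = msg ++ pads msg msg.length c := by
  intro fuel
  induction fuel with
  | zero =>
    intro j hj hf
    have : j = c := by omega
    subst this
    rfl
  | succ f ih =>
    intro j hj hf
    unfold padAgo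
    have hlen : (msg ++ pads msg msg.length j).length = msg.length + j := by
      simp [pads_length]
    by_cases hjc : j = c
    · subst hjc
      rw [if_pos]
      rw [hlen, mod_zero_iff]
      exact hc
    · have hjlt : j < c := by omega
      rw [if_neg (by rw [hlen, mod_zero_iff]; exact hcm j hjlt)]
      have hstep : (msg ++ pads msg msg.length j) ++
          [(msg ++ pads msg msg.length j).getD j 0]
          = msg ++ pads msg msg.length (j + 1) := by
        rw [getD_append_pads msg j (hn (by omega)), pads_succ, List.append_assoc]
      rw [hstep]
      exact ih (j + 1) (by omega) (by omega)

-- A's result, in closed form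
theorem pad_message_eq (msg : List Int) (key_row : Int) (hk : key_row ≠ 0) :
    pad_message msg key_row
      = msg ++ pads msg msg.length
          ((key_row.natAbs - msg.length % key_row.natAbs) % key_row.natAbs) := by
  have hK : 0 < key_row.natAbs := Int.natAbs_pos.mpr hk
  set K := key_row.natAbs with hKdef
  set n := msg.length with hndef
  set r := n % K with hrdef
  have hrK : r < K := Nat.mod_lt _ hK
  set c := (K - r) % K with hcdef
  have hcK : c < K := Nat.mod_lt _ hK
  have hc0 : r = 0 → c = 0 := by
    intro h; rw [hcdef, h, Nat.sub_zero, Nat.mod_self]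
  have hcr : r ≠ 0 → c = K - r := by
    intro h; rw [hcdef]; exact Nat.mod_eq_of_lt (by omega)
  have hc : (n + c) % K = 0 := by
    by_cases hr : r = 0
    · rw [hc0 hr, Nat.add_zero, ← hrdef]
      exact hr
    · rw [hcr hr]
      have hdm := Nat.div_add_mod n K
      rw [← hrdef] at hdm
      have hsum : n + (K - r) = K * (n / K + 1) := by
        rw [Nat.mul_add, Nat.mul_one]
        omega
      rw [hsum, Nat.mul_mod_right]
  have hcm : ∀ j, j < c → (n + j) % K ≠ 0 := by
    intro j hj
    have hrne : r ≠ 0 := by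
      intro h; rw [hc0 h] at hj; omega
    have hjK : j < K := by omega
    rw [Nat.add_mod, ← hrdef, Nat.mod_eq_of_lt hjK, Nat.mod_eq_of_lt (by omega : r + j < K)]
    omega
  have hn : c ≠ 0 → 0 < n := by
    intro hcne
    by_contra h
    push_neg at h
    have : n = 0 := by omega
    have : r = 0 := by rw [hrdef, this]; simp
    exact hcne (hc0 this)
  have h := loop_eq msg key_row c hn hc hcm K 0 (by omega) (by omega)
  have hz : msg ++ pads msg msg.length 0 = msg := by simp [pads]
  rw [hz] at h
  unfold pad_message
  rw [← hKdef, ← hndef] at *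
  exact h

-- B's result, in the same closed form
theorem pad_message_alt_eq (msg : List Int) (key_row : Int) (hk : key_row ≠ 0) :
    pad_message_alt msg key_row
      = msg ++ pads msg msg.length
          ((key_row.natAbs - msg.length % key_row.natAbs) % key_row.natAbs) := by
  have hK : 0 < key_row.natAbs := Int.natAbs_pos.mpr hk
  set K := key_row.natAbs with hKdef
  set n := msg.length with hndef
  set r := n % K with hrdef
  have hrK : r < K := Nat.mod_lt _ hK
  set c := (K - r) % K with hcdef
  have hcount : PySem.Int.mod (-(n : Int)) (K : Int) = (c : Int) := by
    rw [PySem.Int.mod_eq_emod_of_pos (by exact_mod_cast hK)]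
    have hq : (n : Int) = (K : Int) * ((n / K : Nat) : Int) + (r : Int) := by
      exact_mod_cast (Nat.div_add_mod n K).symm
    have hrw : (-(n : Int)) = ((K : Int) - (r : Int)) + (K : Int) * (-(((n / K : Nat) : Int)) - 1) := by
      rw [hq]; ring
    rw [hrw, Int.add_mul_emod_self_left]
    have : ((K : Int) - (r : Int)) = (((K - r : Nat)) : Int) := by
      push_cast [Nat.cast_sub (le_of_lt hrK)]; ring
    rw [this]
    exact_mod_cast PySem.Int.mod_eq_emod_of_pos (b := (K : Int)) (by exact_mod_cast hK) ▸
      (PySem.Int.mod_natCast (K - r) K)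
  unfold pad_message_alt
  simp only [← hndef, ← hKdef, hcount]
  by_cases hc0 : c = 0
  · rw [hc0]
    simp [pads]
  · rw [if_pos (by exact_mod_cast hc0)]
    congr 1
    rw [PySem.List.pyRange_zero_nat c]
    unfold pads
    rw [List.map_map]
    apply List.map_congr_left
    intro i hi
    have hiC : i < c := List.mem_range.mp hi
    simp only [Function.comp_apply]
    rw [PySem.Int.mod_natCast, PySem.List.pyGetD_natCast]

-- ===== VERDICT (by name: the statement is the Claim_ definition above) =====
theorem pad_message_spec : Claim_equal_pad_message := by
  intro msg key_row _ hk
  unfold Spec_pad_message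
  rw [pad_message_eq msg key_row hk, pad_message_alt_eq msg key_row hk]
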